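-- pv_equiv track=rewrite | github.com/louis-cl/advent-of-code | 2025/day3/part1.py | solve
-- ===== SOURCE A (Python) =====
-- def solve(lines):
--     jolts = 0
--     for ints in lines:
--         besti = 0
--         best = ints[:2]
--         n = len(ints)
--         for i in range(1, n):
--             if i+1 < n and ints[i] > best[0]:
--                 besti = i
--                 best = ints[i:i+2]
--             elif i > besti and ints[i] > best[1]:
--                 best[1] = ints[i]
--
--         jolts += best[0] * 10 + best[1]
--     return jolts
-- ===== SOURCE B (Python) =====
-- def solve(lines):
--     total = 0
--     for ints in lines:
--         head = ints[:-1]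
--         m = max(head)
--         total += m * 10 + max(ints[head.index(m) + 1:])
--     return total
-- ===== Notes on version B (the rewrite author's own statement) =====
-- stated objective: simpler
-- what changed: Replaces A's single fused scan that maintains and mutates a 2-element best pair with two plain passes per line: take the max of the line without its last element, then the max of the suffix after its first occurrence.
import Mathlib
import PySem

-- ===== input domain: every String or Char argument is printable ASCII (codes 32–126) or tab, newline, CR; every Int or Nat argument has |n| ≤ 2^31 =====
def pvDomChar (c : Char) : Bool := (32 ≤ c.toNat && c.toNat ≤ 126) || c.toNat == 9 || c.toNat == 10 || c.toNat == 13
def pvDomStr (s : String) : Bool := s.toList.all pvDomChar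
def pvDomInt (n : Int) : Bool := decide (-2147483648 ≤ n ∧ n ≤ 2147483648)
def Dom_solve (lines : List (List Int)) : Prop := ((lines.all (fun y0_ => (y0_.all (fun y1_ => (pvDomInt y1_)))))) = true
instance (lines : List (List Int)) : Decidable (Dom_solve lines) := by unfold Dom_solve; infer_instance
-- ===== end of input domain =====

-- B replaces A's fused scan mutating a 2-element best pair by two plain passes per
-- line (max of the line minus its last element, then max of the suffix after its
-- first occurrence); objective: simpler.

-- ===== PORT A =====
-- the body of A's inner loop: state (besti, best)
def stepA (ints : List Int) (n : Int) (s : Int × List Int) (i : Int) : Int × List Int :=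
  if i + 1 < n ∧ PySem.List.pyGetD ints i 0 > PySem.List.pyGetD s.2 0 0 then
    (i, PySem.List.slice ints (some i) (some (i + 2)))
  else if i > s.1 ∧ PySem.List.pyGetD ints i 0 > PySem.List.pyGetD s.2 1 0 then
    (s.1, PySem.List.pySetD s.2 1 (PySem.List.pyGetD ints i 0))
  else s

def solveLine (ints : List Int) : Int :=
  let n : Int := ints.length
  let r := (PySem.List.pyRange 1 n 1).foldl (stepA ints n)
    (0, PySem.List.slice ints none (some 2))
  PySem.List.pyGetD r.2 0 0 * 10 + PySem.List.pyGetD r.2 1 0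

def solve (lines : List (List Int)) : Int :=
  lines.foldl (fun jolts ints => jolts + solveLine ints) 0

-- ===== PORT B =====
def solveLineAlt (ints : List Int) : Int :=
  let head := PySem.List.slice ints none (some (-1))
  let m := (PySem.List.max? head (fun x => x)).getD 0
  m * 10 + (PySem.List.max? (PySem.List.slice ints
      (some (((PySem.List.index? head m).getD 0 + 1 : Nat) : Int)) none) (fun x => x)).getD 0

def solve_alt (lines : List (List Int)) : Int :=
  lines.foldl (fun total ints => total + solveLineAlt ints) 0

-- ===== PRECONDITION & SPEC =====
-- Pre_ excludes exactly the lines with fewer than 2 elements, on which A raises IndexError.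
def Pre_solve (lines : List (List Int)) : Prop := ∀ l ∈ lines, 2 ≤ l.length
instance (lines : List (List Int)) : Decidable (Pre_solve lines) := by unfold Pre_solve; infer_instance
def pvWitness_solve : List (List Int) := [[1, 2], [3, 5, 4]]

def Spec_solve (lines : List (List Int)) (out : Int) : Prop := out = solve_alt lines
instance (lines : List (List Int)) (out : Int) : Decidable (Spec_solve lines out) := by unfold Spec_solve; infer_instance

-- ===== CLAIM (what is proved, stated in full; the proofs are below) =====
def Claim_equal_solve : Prop := ∀ (lines : List (List Int)), Dom_solve lines → Pre_solve lines → Spec_solve lines (solve lines)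

-- ===== LEMMAS AND PROOFS =====

-- first index of the maximum of a[0..j]
def fam (a : List Int) : Nat → Nat
  | 0 => 0
  | j+1 => if a.getD (fam a j) 0 < a.getD (j+1) 0 then j + 1 else fam a j

-- max of a[i..i+t]
def segMax (a : List Int) (i : Nat) : Nat → Int
  | 0 => a.getD i 0
  | t+1 => max (segMax a i t) (a.getD (i+t+1) 0)

-- max of a nonempty list (0 for [])
def lmax : List Int → Int
  | [] => 0
  | x :: xs => xs.foldl max x

lemma fam_le (a : List Int) (j : Nat) : fam a j ≤ j := by
  induction j with
  | zero => simp [fam]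
  | succ j ih => unfold fam; split <;> omega

lemma fam_max (a : List Int) (j : Nat) : ∀ t ≤ j, a.getD t 0 ≤ a.getD (fam a j) 0 := by
  induction j with
  | zero => intro t ht; interval_cases t; simp [fam]
  | succ j ih =>
    intro t ht
    unfold fam; split <;> rename_i h
    · rcases Nat.lt_or_ge t (j+1) with h' | h'
      · exact le_trans (ih t (by omega)) (le_of_lt h)
      · have : t = j + 1 := by omega
        subst this; exact le_refl _
    · rcases Nat.lt_or_ge t (j+1) with h' | h'
      · exact ih t (by omega)
      · have : t = j + 1 := by omega
        subst this; omega
  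
lemma fam_first (a : List Int) (j : Nat) : ∀ t < fam a j, a.getD t 0 < a.getD (fam a j) 0 := by
  induction j with
  | zero => intro t ht; simp [fam] at ht
  | succ j ih =>
    intro t ht
    by_cases hc : a.getD (fam a j) 0 < a.getD (j+1) 0
    · simp only [fam, if_pos hc] at ht ⊢
      exact lt_of_le_of_lt (fam_max a j t (by omega)) hc
    · simp only [fam, if_neg hc] at ht ⊢
      exact ih t ht

lemma foldl_max_mem (xs : List Int) (m : Int) : xs.foldl max m ∈ m :: xs := by
  induction xs generalizing m with
  | nil => simp
  | cons y ys ih =>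
    simp only [List.foldl]
    have h := ih (max m y)
    rcases List.mem_cons.1 h with h' | h'
    · rcases max_choice m y with hc | hc
      · exact List.mem_cons.2 (Or.inl (h'.trans hc))
      · exact List.mem_cons.2 (Or.inr (List.mem_cons.2 (Or.inl (h'.trans hc))))
    · exact List.mem_cons.2 (Or.inr (List.mem_cons.2 (Or.inr h')))

lemma max?_eq_lmax (l : List Int) (h : l ≠ []) :
    PySem.List.max? l (fun x => x) = some (lmax l) := by
  obtain ⟨v, hv⟩ : ∃ v, PySem.List.max? l (fun x => x) = some v := by
    cases hm : PySem.List.max? l (fun x => x) with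
    | none => exact absurd ((PySem.List.max?_eq_none_iff l _).1 hm) h
    | some v => exact ⟨v, rfl⟩
  rw [hv]
  have hmem := PySem.List.max?_mem hv
  have hmax := PySem.List.max?_isMax hv
  cases l with
  | nil => simp at h
  | cons x xs =>
    have h1 : lmax (x :: xs) ∈ x :: xs := foldl_max_mem xs x
    have h2 := PySem.List.le_foldl_max xs x
    have hvle : v ≤ lmax (x :: xs) := by
      rcases List.mem_cons.1 hmem with rfl | hm
      · exact h2.1
      · exact h2.2 _ hm
    have hlev : lmax (x :: xs) ≤ v := hmax _ h1
    congr 1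
    omega

lemma lmax_append (l : List Int) (y : Int) (h : l ≠ []) :
    lmax (l ++ [y]) = max (lmax l) y := by
  cases l with
  | nil => simp at h
  | cons x xs => simp [lmax, List.foldl_append]

lemma drop_take_two (a : List Int) (k : Nat) (h : k + 1 < a.length) :
    (a.drop k).take 2 = [a.getD k 0, a.getD (k+1) 0] := by
  have h1 : a.drop k = a[k]'(by omega) :: a.drop (k+1) := List.drop_eq_getElem_cons (by omega)
  have h2 : a.drop (k+1) = a[k+1]'(by omega) :: a.drop (k+2) := List.drop_eq_getElem_cons (by omega)
  rw [h1, h2, List.getD_eq_getElem a 0 (show k < a.length by omega),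
      List.getD_eq_getElem a 0 (show k+1 < a.length by omega)]
  rfl

lemma segMax_eq_lmax (a : List Int) (i t : Nat) (h : i + t < a.length) :
    segMax a i t = lmax ((a.drop i).take (t+1)) := by
  induction t with
  | zero =>
    have h1 : a.drop i = a[i]'(by omega) :: a.drop (i+1) := List.drop_eq_getElem_cons (by omega)
    rw [segMax, h1, List.getD_eq_getElem a 0 (show i < a.length by omega)]
    rfl
  | succ t ih =>
    have hx : (a.drop i)[t+1]? = some (a.getD (i+t+1) 0) := by
      rw [List.getElem?_drop, List.getElem?_eq_getElem (by omega : i + (t+1) < a.length),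
          List.getD_eq_getElem a 0 (show i+t+1 < a.length by omega)]
      rfl
    have hne : (a.drop i).take (t+1) ≠ [] := by
      simp only [ne_eq, List.take_eq_nil_iff]
      push_neg
      refine ⟨by omega, fun hnil => ?_⟩
      have := congrArg List.length hnil
      simp at this
      omega
    rw [List.take_succ, hx, Option.toList_some, lmax_append _ _ hne]
    show max (segMax a i t) (a.getD (i+t+1) 0) = _
    rw [ih (by omega)]

lemma lmax_take (a : List Int) (j : Nat) (h : j < a.length) :
    lmax (a.take (j+1)) = a.getD (fam a j) 0 := by
  induction j with
  | zero =>
    cases a with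
    | nil => simp at h
    | cons x xs => rfl
  | succ j ih =>
    have hx : a[j+1]? = some (a[j+1]'(by omega)) := List.getElem?_eq_getElem (by omega)
    have hne : a.take (j+1) ≠ [] := by
      simp only [ne_eq, List.take_eq_nil_iff]
      push_neg
      refine ⟨by omega, fun hnil => ?_⟩
      subst hnil
      simp at h
    rw [List.take_succ, hx, Option.toList_some, lmax_append _ _ hne, ih (by omega)]
    show max (a.getD (fam a j) 0) (a[j+1]'(by omega)) = a.getD (fam a (j+1)) 0
    rw [show fam a (j+1) = if a.getD (fam a j) 0 < a.getD (j+1) 0 then j + 1 else fam a j from rfl]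
    rw [List.getD_eq_getElem a 0 (show j+1 < a.length by omega)]
    split <;> rename_i hc
    · rw [List.getD_eq_getElem a 0 (show j+1 < a.length by omega)]
      exact max_eq_right (le_of_lt hc)
    · exact max_eq_left (by omega)

lemma mem_take_lt (a : List Int) (k : Nat) (x : Int) (hx : x ∈ a.take k) :
    ∃ t, t < k ∧ t < a.length ∧ a.getD t 0 = x := by
  obtain ⟨t, ht, hget⟩ := List.getElem_of_mem hx
  refine ⟨t, ?_, ?_, ?_⟩
  · simp at ht; omega
  · simp at ht; omega
  · rw [List.getElem_take] at hget
    rw [List.getD_eq_getElem _ _ (by simp at ht; omega)]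
    exact hget

lemma index_take (a : List Int) (j : Nat) (h : j < a.length) :
    PySem.List.index? (a.take (j+1)) (a.getD (fam a j) 0) = some (fam a j) := by
  have hF := fam_le a j
  rw [PySem.List.index?_eq_some_iff]
  refine ⟨a.take (fam a j), (a.drop (fam a j + 1)).take (j - fam a j), ?_, ?_, ?_⟩
  · rw [show a.take (fam a j) = (a.take (j+1)).take (fam a j) by
        rw [List.take_take]; congr 1; omega]
    conv_lhs => rw [← List.take_append_drop (fam a j) (a.take (j+1))]
    congr 1
    rw [List.drop_take]
    rw [List.drop_eq_getElem_cons (by omega : fam a j < a.length)]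
    rw [show j + 1 - fam a j = (j - fam a j) + 1 by omega]
    rw [List.take_succ_cons]
    congr 1
    rw [List.getD_eq_getElem _ _ (by omega : fam a j < a.length)]
  · rw [List.length_take]; omega
  · intro hmem
    obtain ⟨t, ht, htl, hval⟩ := mem_take_lt a (fam a j) _ hmem
    have := fam_first a j t ht
    omega

lemma seg_step (a : List Int) (F k : Nat) (h : F + 1 ≤ k) :
    segMax a (F+1) (k - (F+1)) = max (segMax a (F+1) (max (k-1) (F+1) - (F+1))) (a.getD k 0) := by
  rcases Nat.eq_or_lt_of_le h with heq | hlt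
  · rw [show k - (F+1) = 0 by omega, show max (k-1) (F+1) - (F+1) = 0 by omega]
    show a.getD (F+1) 0 = max (a.getD (F+1) 0) (a.getD k 0)
    rw [heq]
    exact (max_self _).symm
  · rw [show k - (F+1) = (k - F - 2) + 1 by omega, show max (k-1) (F+1) - (F+1) = k - F - 2 by omega]
    show max (segMax a (F+1) (k-F-2)) (a.getD ((F+1)+(k-F-2)+1) 0) = _
    rw [show (F+1)+(k-F-2)+1 = k by omega]

-- the A-loop invariant: after processing i = 1..k-1, besti is the first argmax of
-- a[0..min(k-1,n-2)] and best = [a[besti], max of a[besti+1 .. max(k-1,besti+1)]]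
lemma loop_inv (a : List Int) (h2 : 2 ≤ a.length) :
    ∀ k : Nat, 1 ≤ k → k ≤ a.length →
    (PySem.List.pyRange 1 (k : Int) 1).foldl (stepA a (a.length : Int))
      (0, PySem.List.slice a none (some 2))
    = (((fam a (min (k-1) (a.length-2)) : Nat) : Int),
       [a.getD (fam a (min (k-1) (a.length-2))) 0,
        segMax a (fam a (min (k-1) (a.length-2)) + 1)
          (max (k-1) (fam a (min (k-1) (a.length-2)) + 1) - (fam a (min (k-1) (a.length-2)) + 1))]) := by
  intro k hk
  induction k, hk using Nat.le_induction with
  | base =>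
    intro _
    rw [show ((1:Nat):Int) = (1:Int) by norm_num, PySem.List.pyRange_one_eq_nil (by norm_num)]
    simp only [List.foldl_nil]
    have hs : PySem.List.slice a none (some 2) = a.take 2 := by
      have := PySem.List.slice_to_natCast a 2
      norm_num at this
      exact this
    rw [hs, show a.take 2 = (a.drop 0).take 2 by rw [List.drop_zero],
        drop_take_two a 0 (by omega)]
    simp [fam, segMax]
  | succ k hk ih =>
    intro hkn
    have hrange : PySem.List.pyRange 1 ((k+1 : Nat) : Int) 1
        = PySem.List.pyRange 1 (k : Int) 1 ++ [(k : Int)] := by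
      push_cast
      exact PySem.List.pyRange_one_succ_right (by exact_mod_cast hk)
    rw [hrange, List.foldl_append, ih (by omega), List.foldl_cons, List.foldl_nil]
    have hFle : fam a (min (k-1) (a.length-2)) ≤ min (k-1) (a.length-2) := fam_le a _
    set F := fam a (min (k-1) (a.length-2)) with hFdef
    set M := segMax a (F+1) (max (k-1) (F+1) - (F+1)) with hMdef
    have e1 : PySem.List.pyGetD a (k : Int) 0 = a.getD k 0 := by simp
    have e2 : PySem.List.pyGetD [a.getD F 0, M] 0 0 = a.getD F 0 := by simp [pysem]
    have e3 : PySem.List.pyGetD [a.getD F 0, M] 1 0 = M := by simp [pysem]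
    have hkm1 : k - 1 + 1 = k := by omega
    simp only [stepA, e1, e2, e3]
    split_ifs with hc1 hc2
    · -- new first argmax at k
      obtain ⟨hlt, hgt⟩ := hc1
      have hklt : k + 1 < a.length := by exact_mod_cast hlt
      have hsl : PySem.List.slice a (some (k:Int)) (some ((k:Int)+2)) = (a.drop k).take 2 := by
        rw [show ((k:Int)+2) = ((k:Int) + ((2:Nat):Int)) by norm_num]
        exact PySem.List.slice_natCast_add a k 2
      rw [hsl, drop_take_two a k (by omega)]
      have hmin1 : min (k-1) (a.length-2) = k-1 := by omega
      have hminK : min ((k+1)-1) (a.length-2) = k := by omega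
      have hfamk : fam a k = k := by
        obtain ⟨j, rfl⟩ : ∃ j, k = j + 1 := ⟨k-1, by omega⟩
        rw [show fam a (j+1) = if a.getD (fam a j) 0 < a.getD (j+1) 0 then j + 1 else fam a j
            from rfl, if_pos]
        rw [hFdef, hmin1] at hgt
        simpa using hgt
      rw [hminK, hfamk]
      rw [show max ((k+1)-1) (k+1) - (k+1) = 0 by omega]
      rfl
    · -- best1 updated to a[k]
      obtain ⟨hFk', hgt⟩ := hc2
      have hFk1 : F + 1 ≤ k := by omega
      have hFeq : fam a (min ((k+1)-1) (a.length-2)) = F := by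
        by_cases hk2 : k + 1 < a.length
        · have hminK : min ((k+1)-1) (a.length-2) = k := by omega
          have hmin1 : min (k-1) (a.length-2) = k-1 := by omega
          rw [hminK]
          obtain ⟨j, rfl⟩ : ∃ j, k = j + 1 := ⟨k-1, by omega⟩
          rw [show fam a (j+1) = if a.getD (fam a j) 0 < a.getD (j+1) 0 then j + 1 else fam a j
              from rfl, if_neg]
          · rw [hFdef, hmin1]
            simp
          · have hnc := hc1
            push_neg at hnc
            have h3 := hnc (by exact_mod_cast hk2)
            rw [hFdef, hmin1, show j+1-1 = j by omega] at h3
            omega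
        · have : min ((k+1)-1) (a.length-2) = min (k-1) (a.length-2) := by omega
          rw [this, hFdef]
      rw [show PySem.List.pySetD [a.getD F 0, M] 1 (a.getD k 0) = [a.getD F 0, a.getD k 0]
          from rfl]
      rw [hFeq]
      rw [show max ((k+1)-1) (F+1) - (F+1) = k - (F+1) by omega]
      rw [seg_step a F k hFk1]
      rw [max_eq_right (le_of_lt hgt)]
    · -- nothing changes
      have hFk1 : F + 1 ≤ k := by omega
      have hFeq : fam a (min ((k+1)-1) (a.length-2)) = F := by
        by_cases hk2 : k + 1 < a.length
        · have hminK : min ((k+1)-1) (a.length-2) = k := by omega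
          have hmin1 : min (k-1) (a.length-2) = k-1 := by omega
          rw [hminK]
          obtain ⟨j, rfl⟩ : ∃ j, k = j + 1 := ⟨k-1, by omega⟩
          rw [show fam a (j+1) = if a.getD (fam a j) 0 < a.getD (j+1) 0 then j + 1 else fam a j
              from rfl, if_neg]
          · rw [hFdef, hmin1]
            simp
          · have hnc := hc1
            push_neg at hnc
            have h3 := hnc (by exact_mod_cast hk2)
            rw [hFdef, hmin1, show j+1-1 = j by omega] at h3
            omega
        · have : min ((k+1)-1) (a.length-2) = min (k-1) (a.length-2) := by omega
          rw [this, hFdef]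
      have hle : a.getD k 0 ≤ M := by
        push_neg at hc2
        have := hc2 (by exact_mod_cast (show F < k by omega))
        omega
      rw [hFeq]
      rw [show max ((k+1)-1) (F+1) - (F+1) = k - (F+1) by omega]
      rw [seg_step a F k hFk1]
      rw [max_eq_left hle]

lemma line_eq (a : List Int) (h : 2 ≤ a.length) : solveLine a = solveLineAlt a := by
  have hA := loop_inv a h a.length (by omega) (le_refl _)
  have hmin : min (a.length-1) (a.length-2) = a.length-2 := by omega
  have hFle := fam_le a (a.length-2)
  set F := fam a (a.length-2) with hFdef
  -- A side
  have hAval : solveLine a = a.getD F 0 * 10 + segMax a (F+1) (a.length - F - 2) := by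
    simp only [solveLine]
    rw [show a.length - 1 = a.length - 1 from rfl] at hA
    rw [hA]
    rw [show min (a.length-1) (a.length-2) = a.length - 2 by omega]
    rw [show max (a.length-1) (F+1) - (F+1) = a.length - F - 2 by omega]
    simp [pysem]
    rfl
  -- B side
  have hne1 : a.take (a.length-1) ≠ [] := by
    simp only [ne_eq, List.take_eq_nil_iff]
    push_neg
    refine ⟨by omega, fun hnil => ?_⟩
    subst hnil
    simp at h
  have hhead : PySem.List.slice a none (some (-1)) = a.take (a.length-1) := by
    rw [PySem.List.slice_to_neg_one, List.dropLast_eq_take]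
  have hm : (PySem.List.max? (a.take (a.length-1)) (fun x => x)).getD 0 = a.getD F 0 := by
    rw [max?_eq_lmax _ hne1, Option.getD_some,
        show a.length - 1 = (a.length-2)+1 by omega, lmax_take a (a.length-2) (by omega), hFdef]
  have hidx : PySem.List.index? (a.take (a.length-1)) (a.getD F 0) = some F := by
    rw [show a.length - 1 = (a.length-2)+1 by omega, hFdef]
    exact index_take a (a.length-2) (by omega)
  have hdrop : PySem.List.slice a (some ((F+1 : Nat) : Int)) none = a.drop (F+1) :=
    PySem.List.slice_from_natCast a (F+1)
  have hdrop_ne : a.drop (F+1) ≠ [] := by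
    intro hnil
    have := congrArg List.length hnil
    simp at this
    omega
  have hsuf : (PySem.List.max? (a.drop (F+1)) (fun x => x)).getD 0
      = segMax a (F+1) (a.length - F - 2) := by
    rw [max?_eq_lmax _ hdrop_ne, Option.getD_some,
        segMax_eq_lmax a (F+1) (a.length - F - 2) (by omega)]
    congr 1
    rw [show a.length - F - 2 + 1 = (a.drop (F+1)).length by simp; omega, List.take_length]
  have hBval : solveLineAlt a = a.getD F 0 * 10 + segMax a (F+1) (a.length - F - 2) := by
    simp only [solveLineAlt]
    rw [hhead, hm, hidx, Option.getD_some, hdrop, hsuf]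
  rw [hAval, hBval]

-- ===== VERDICT (by name: the statement is the Claim_ definition above) =====
theorem solve_spec : Claim_equal_solve := by
  intro lines _hdom hpre
  unfold Spec_solve solve solve_alt
  exact PySem.List.foldl_congr_mem lines _ _ 0
    (fun acc x hx => by rw [line_eq x (hpre x hx)])
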